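-- pv_equiv track=rewrite | github.com/SameerJain/CodepathTP101 | unit_3_strings/session2_6_19/pset_1.py | sum_of_unique_elements
-- ===== SOURCE A (Python) =====
-- def sum_of_unique_elements(lst1,lst2):
--     freqs = {}
--     final_sum = 0
--     for num in lst1 + lst2:
--         freqs[num] = freqs.get(num,0) + 1
--
--     for num in lst1:
--         if freqs[num] == 1:
--             final_sum += num
--     return final_sum
-- ===== SOURCE B (Python) =====
-- def sum_of_unique_elements(lst1, lst2):
--     counts = {}
--     for x in lst1:
--         counts[x] = counts.get(x, 0) + 1
--     exclude = set(lst2)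
--     return sum(v for v, c in counts.items() if c == 1 and v not in exclude)
-- ===== Notes on version B (the rewrite author's own statement) =====
-- stated objective: alternative
-- what changed: Instead of counting the concatenation lst1+lst2 and re-scanning lst1 positionally, B counts only lst1, builds a set of lst2, and sums the distinct dict values whose lst1-count is 1 and which are absent from lst2.
import Mathlib
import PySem

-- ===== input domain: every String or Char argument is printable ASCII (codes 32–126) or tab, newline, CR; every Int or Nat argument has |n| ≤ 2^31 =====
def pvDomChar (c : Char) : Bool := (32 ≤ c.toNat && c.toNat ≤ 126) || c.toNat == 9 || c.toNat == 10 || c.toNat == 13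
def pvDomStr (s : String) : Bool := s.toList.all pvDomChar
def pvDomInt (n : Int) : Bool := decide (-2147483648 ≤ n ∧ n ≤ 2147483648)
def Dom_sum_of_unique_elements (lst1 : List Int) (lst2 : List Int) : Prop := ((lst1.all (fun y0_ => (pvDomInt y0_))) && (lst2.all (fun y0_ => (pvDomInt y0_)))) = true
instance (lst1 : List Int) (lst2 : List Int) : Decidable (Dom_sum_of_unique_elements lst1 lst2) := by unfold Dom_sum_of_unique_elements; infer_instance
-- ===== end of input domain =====

-- B counts lst1 only and sums the distinct counter entries with count 1 that are absent from set(lst2),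
-- instead of counting lst1+lst2 and re-scanning lst1 positionally (objective: alternative decomposition).

-- ===== PORT A =====
def sum_of_unique_elements (lst1 : List Int) (lst2 : List Int) : Int :=
  let freqs := (lst1 ++ lst2).foldl (fun d num => d.insert num (d.getD num 0 + 1)) (PySem.Dict.empty : PySem.Dict Int Int)
  -- freqs[num]: num ∈ lst1 is always a key of freqs, so the KeyError branch is unreachable; getD is exact here
  lst1.foldl (fun s num => if freqs.getD num 0 == 1 then s + num else s) 0

-- ===== PORT B =====
def sum_of_unique_elements_alt (lst1 : List Int) (lst2 : List Int) : Int :=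
  let counts := lst1.foldl (fun d x => d.insert x (d.getD x 0 + 1)) (PySem.Dict.empty : PySem.Dict Int Int)
  let exclude : PySem.Set Int := PySem.Set.ofList lst2
  ((counts.items.filter (fun p => p.2 == 1 && !(PySem.Set.contains exclude p.1))).map (·.1)).sum

-- ===== PRECONDITION & SPEC =====
def Spec_sum_of_unique_elements (lst1 : List Int) (lst2 : List Int) (out : Int) : Prop := out = sum_of_unique_elements_alt lst1 lst2
instance (lst1 : List Int) (lst2 : List Int) (out : Int) : Decidable (Spec_sum_of_unique_elements lst1 lst2 out) := by unfold Spec_sum_of_unique_elements; infer_instance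

-- ===== CLAIM (what is proved, stated in full; the proofs are below) =====
def Claim_equal_sum_of_unique_elements : Prop := ∀ (lst1 : List Int) (lst2 : List Int), Dom_sum_of_unique_elements lst1 lst2 → Spec_sum_of_unique_elements lst1 lst2 (sum_of_unique_elements lst1 lst2)

-- ===== LEMMAS AND PROOFS =====

-- 'final_sum += num if cond' loop is the sum of the filtered list
theorem pv_foldl_if_add (p : Int → Bool) (l : List Int) (a : Int) :
    l.foldl (fun s x => if p x then s + x else s) a = a + (l.filter p).sum := by
  induction l generalizing a with
  | nil => simp
  | cons x xs ih =>
    by_cases h : p x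
    · simp [h, ih]; ring
    · simp [h, ih]

-- (n : Int) == 1 is n == 1 on the Nat counts
theorem pv_cast_beq (n : Nat) : ((n : Int) == 1) = (n == 1) := by
  simp

-- the two filtered lists are permutations, element counts agree
theorem pv_filter_perm (lst1 : List Int) (p : Int → Bool)
    (hp : ∀ x, p x = true → lst1.count x = 1) :
    (lst1.filter p).Perm ((PySem.Set.ofList lst1).filter p) := by
  rw [List.perm_iff_count]
  intro a
  by_cases h : p a = true
  · rw [List.count_filter h, List.count_filter h]
    have h1 : lst1.count a = 1 := hp a h
    have hmem : a ∈ lst1 := List.count_pos_iff.mp (by omega)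
    have hmem' : a ∈ PySem.Set.ofList lst1 := (PySem.Set.mem_ofList _ _).mpr hmem
    rw [h1, List.count_eq_one_of_mem (PySem.Set.nodup_ofList lst1) hmem']
  · have h0 : ∀ l : List Int, (l.filter p).count a = 0 := by
      intro l
      rw [List.count_eq_zero]
      intro hc
      exact h (List.of_mem_filter hc)
    rw [h0, h0]

theorem sum_of_unique_elements_eq (lst1 lst2 : List Int) :
    sum_of_unique_elements lst1 lst2 = sum_of_unique_elements_alt lst1 lst2 := by
  simp only [sum_of_unique_elements, sum_of_unique_elements_alt]
  simp only [PySem.Dict.foldl_insert_getD_add_one_eq_counter]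
  refine Eq.trans (pv_foldl_if_add (fun num => (PySem.Dict.counter (lst1 ++ lst2)).getD num 0 == 1) lst1 0) ?_
  rw [zero_add]
  rw [PySem.Dict.items_counter]
  rw [List.filter_map, List.map_map]
  simp only [Function.comp_def, PySem.Dict.getD_counter, pv_cast_beq]
  -- unify the predicates on both sides with pC x := (count x lst1 == 1 && !(lst2.contains x))
  have hA : lst1.filter (fun x => (lst1 ++ lst2).count x == 1)
      = lst1.filter (fun x => lst1.count x == 1 && !(lst2.contains x)) := by
    apply List.filter_congr
    intro x hx
    have h1 : 1 ≤ lst1.count x := List.count_pos_iff.mpr hx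
    rw [List.count_append]
    by_cases h2 : x ∈ lst2
    · have h3 : 1 ≤ lst2.count x := List.count_pos_iff.mpr h2
      have h4 : lst2.contains x = true := by simpa using h2
      rw [h4]
      simp only [Bool.not_true, Bool.and_false, beq_eq_false_iff_ne, ne_eq]
      omega
    · have h0 : lst2.count x = 0 := List.count_eq_zero.mpr h2
      have h4 : lst2.contains x = false := by simpa using h2
      rw [h0, h4]
      simp
  have hB : (PySem.Set.ofList lst1).filter
        (fun x => lst1.count x == 1 && !(PySem.Set.contains (PySem.Set.ofList lst2) x))
      = (PySem.Set.ofList lst1).filter (fun x => lst1.count x == 1 && !(lst2.contains x)) := by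
    apply List.filter_congr
    intro x _
    have hc : PySem.Set.contains (PySem.Set.ofList lst2) x = lst2.contains x := by
      by_cases h : x ∈ lst2
      · have : x ∈ PySem.Set.ofList lst2 := (PySem.Set.mem_ofList _ _).mpr h
        simp [PySem.Set.contains_eq_listContains, this, h]
      · have : x ∉ PySem.Set.ofList lst2 := fun hh => h ((PySem.Set.mem_ofList _ _).mp hh)
        simp [PySem.Set.contains_eq_listContains, this, h]
    rw [hc]
  rw [hA, hB]
  have hperm := pv_filter_perm lst1 (fun x => lst1.count x == 1 && !(lst2.contains x)) (by
    intro x hx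
    simp only [Bool.and_eq_true, beq_iff_eq] at hx
    exact hx.1)
  simpa using hperm.sum_eq

-- ===== VERDICT (by name: the statement is the Claim_ definition above) =====
theorem sum_of_unique_elements_spec : Claim_equal_sum_of_unique_elements := by
  intro lst1 lst2 _
  exact sum_of_unique_elements_eq lst1 lst2
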